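-- pv_equiv track=rewrite | github.com/Trash5894/opcua-quality-analyzer | src/metrics/metric_engine.py | _count_wmc_nattr
-- ===== SOURCE A (Python) =====
-- from typing import Optional
--
-- def _count_wmc_nattr(start_id: str, references: dict,
--                      node_classes: dict, visited: Optional[set] = None) -> tuple[int, int]:
--     """
--     Recursively count Method nodes (WMC) and Variable nodes (NAttr)
--     reachable via HasComponent / HasProperty / HasAddIn.
--     Matches thesis Figure 4.4 algorithm.
--     """
--     if visited is None:
--         visited = set()
--     if start_id in visited:
--         return 0, 0
--     visited.add(start_id)
--
--     wmc = nattr = 0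
--     for ref_type, target_id in references.get(start_id, []):
--         if ref_type in ("HasComponent", "HasProperty", "HasAddIn"):
--             kind = node_classes.get(target_id, "")
--             if kind == "UAMethod":
--                 wmc += 1
--             elif kind == "UAVariable":
--                 nattr += 1
--             sub_wmc, sub_nattr = _count_wmc_nattr(target_id, references, node_classes, visited)
--             wmc  += sub_wmc
--             nattr += sub_nattr
--     return wmc, nattr
-- ===== SOURCE B (Python) =====
-- def _count_wmc_nattr(start_id, references, node_classes, visited=None):
--     """Iterative explicit-stack DFS; same per-edge counting as the recursive
--     original (children are pushed in reverse so the visiting order is kept)."""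
--     if visited is None:
--         visited = set()
--     wmc = nattr = 0
--     stack = [start_id]
--     while stack:
--         node = stack.pop()
--         if node in visited:
--             continue
--         visited.add(node)
--         for ref_type, target in reversed(references.get(node, [])):
--             if ref_type in ("HasComponent", "HasProperty", "HasAddIn"):
--                 kind = node_classes.get(target, "")
--                 if kind == "UAMethod":
--                     wmc += 1
--                 elif kind == "UAVariable":
--                     nattr += 1
--                 stack.append(target)
--     return wmc, nattr
-- ===== Notes on version B (the rewrite author's own statement) =====
-- stated objective: alternative
-- what changed: Replaces the recursive DFS with an iterative explicit-stack DFS (no call stack, no Python recursion limit pressure); children are pushed in reverse so the visiting order and the per-component-edge counting are preserved.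
import Mathlib
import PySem

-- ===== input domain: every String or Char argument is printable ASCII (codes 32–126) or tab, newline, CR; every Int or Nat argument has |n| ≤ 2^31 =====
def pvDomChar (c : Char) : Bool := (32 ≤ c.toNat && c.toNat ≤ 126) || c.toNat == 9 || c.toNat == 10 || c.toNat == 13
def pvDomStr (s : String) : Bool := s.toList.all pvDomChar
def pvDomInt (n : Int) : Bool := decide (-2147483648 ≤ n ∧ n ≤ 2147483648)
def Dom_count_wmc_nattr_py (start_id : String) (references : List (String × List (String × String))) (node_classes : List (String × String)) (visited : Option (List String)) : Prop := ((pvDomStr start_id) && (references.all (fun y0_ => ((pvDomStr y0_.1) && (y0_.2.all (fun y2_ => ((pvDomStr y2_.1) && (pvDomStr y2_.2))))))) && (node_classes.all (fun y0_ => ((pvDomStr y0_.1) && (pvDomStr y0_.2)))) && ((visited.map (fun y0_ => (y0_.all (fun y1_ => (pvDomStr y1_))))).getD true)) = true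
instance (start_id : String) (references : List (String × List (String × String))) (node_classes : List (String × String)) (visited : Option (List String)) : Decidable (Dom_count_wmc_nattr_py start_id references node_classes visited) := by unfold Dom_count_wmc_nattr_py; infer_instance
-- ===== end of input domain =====

-- B replaces the recursive DFS by an iterative explicit-stack DFS (same per-component-edge
-- counting, children pushed in reverse to keep the visiting order); equivalence is about the
-- RETURN value only — both Pythons also grow a caller-supplied `visited` set in place, identically.

-- ===== PORT A =====
-- fuel for the recursion: never exhausted, since each nested call adds a fresh id (a key or a
-- target of `references`, or the start id) to `visited`
def pvFuelA (references : List (String × List (String × String))) : Nat :=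
  (references.flatMap (fun kv => kv.1 :: kv.2.map Prod.snd)).length + 2

mutual
def pvGoA (references : List (String × List (String × String))) (node_classes : List (String × String))
    (f : Nat) (start_id : String) (visited : List String) : Int × Int × List String :=
  match f with
  | 0 => (0, 0, visited)
  | f' + 1 =>
    if PySem.Set.contains visited start_id then (0, 0, visited)
    else
      pvGoAEdges references node_classes f'
        (PySem.Dict.getD (PySem.Dict.mk references) start_id [])
        (PySem.Set.add visited start_id)
termination_by (f, 0)

def pvGoAEdges (references : List (String × List (String × String))) (node_classes : List (String × String))
    (f : Nat) (es : List (String × String)) (visited : List String) : Int × Int × List String :=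
  match es with
  | [] => (0, 0, visited)
  | (ref_type, target_id) :: rest =>
    if ref_type == "HasComponent" || ref_type == "HasProperty" || ref_type == "HasAddIn" then
      let kind := PySem.Dict.getD (PySem.Dict.mk node_classes) target_id ""
      let wn : Int × Int :=
        if kind == "UAMethod" then (1, 0) else if kind == "UAVariable" then (0, 1) else (0, 0)
      let sub := pvGoA references node_classes f target_id visited
      let rec_ := pvGoAEdges references node_classes f rest sub.2.2
      (wn.1 + sub.1 + rec_.1, wn.2 + sub.2.1 + rec_.2.1, rec_.2.2)
    else pvGoAEdges references node_classes f rest visited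
termination_by (f, es.length + 1)
end

def count_wmc_nattr_py (start_id : String) (references : List (String × List (String × String))) (node_classes : List (String × String)) (visited : Option (List String)) : Int × Int :=
  let v0 := match visited with | none => PySem.Set.empty | some v => v
  let r := pvGoA references node_classes (pvFuelA references) start_id v0
  (r.1, r.2.1)

-- ===== PORT B =====
-- measure pieces for the while loop's termination (cited below by the port's termination proof)
def pvUniv (references : List (String × List (String × String))) : Finset String :=
  (references.flatMap (fun kv => kv.1 :: kv.2.map Prod.snd)).toFinset

def pvN (references : List (String × List (String × String))) (v : List String) : Nat :=
  (pvUniv references \ v.toFinset).card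

def pvK (references : List (String × List (String × String))) : Nat :=
  (references.flatMap (fun kv => kv.2)).length + 1

-- one step of B's inner `for` loop over reversed(references.get(node, []))
def pvStep (node_classes : List (String × String)) (acc : Int × Int × List String)
    (e : String × String) : Int × Int × List String :=
  if e.1 == "HasComponent" || e.1 == "HasProperty" || e.1 == "HasAddIn" then
    if PySem.Dict.getD (PySem.Dict.mk node_classes) e.2 "" == "UAMethod" then
      (acc.1 + 1, acc.2.1, e.2 :: acc.2.2)
    else if PySem.Dict.getD (PySem.Dict.mk node_classes) e.2 "" == "UAVariable" then
      (acc.1, acc.2.1 + 1, e.2 :: acc.2.2)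
    else (acc.1, acc.2.1, e.2 :: acc.2.2)
  else acc

lemma pvStep_len (node_classes : List (String × String)) (acc : Int × Int × List String)
    (e : String × String) : (pvStep node_classes acc e).2.2.length ≤ acc.2.2.length + 1 := by
  unfold pvStep
  split
  · split
    · simp
    · split <;> simp
  · simp

lemma pvFold_len (node_classes : List (String × String)) :
    ∀ (es : List (String × String)) (acc : Int × Int × List String),
      (es.foldl (pvStep node_classes) acc).2.2.length ≤ acc.2.2.length + es.length := by
  intro es
  induction es with
  | nil => intro acc; simp
  | cons e rest ih =>
    intro acc
    have h1 := ih (pvStep node_classes acc e)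
    have h2 := pvStep_len node_classes acc e
    simpa using h1.trans (by omega)

-- getD on the references dict: empty, or the value of some entry of the list
lemma pvGetD_cases (references : List (String × List (String × String))) (s : String) :
    PySem.Dict.getD (PySem.Dict.mk references) s [] = [] ∨
      ∃ kv ∈ references, kv.1 = s ∧ PySem.Dict.getD (PySem.Dict.mk references) s [] = kv.2 := by
  induction references with
  | nil => left; rfl
  | cons kv rest ih =>
    rw [PySem.Dict.getD_eq_get?_getD, PySem.Dict.get?_mk_cons]
    by_cases h : kv.1 == s
    · right
      refine ⟨kv, by simp, by simpa using h, ?_⟩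
      simp [h]
    · rw [if_neg h, ← PySem.Dict.getD_eq_get?_getD]
      rcases ih with h0 | ⟨kv', hm, he, hv⟩
      · left; exact h0
      · right; exact ⟨kv', by simp [hm], he, hv⟩

lemma pvGetD_len (references : List (String × List (String × String))) (s : String) :
    (PySem.Dict.getD (PySem.Dict.mk references) s []).length ≤
      (references.flatMap (fun kv => kv.2)).length := by
  rcases pvGetD_cases references s with h | ⟨kv, hm, _, hv⟩
  · simp [h]
  · rw [hv, List.length_flatMap]
    exact List.single_le_sum (by simp) _ (List.mem_map.2 ⟨kv, hm, rfl⟩)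

lemma pvGetD_of_not_mem (references : List (String × List (String × String))) (s : String)
    (h : s ∉ pvUniv references) : PySem.Dict.getD (PySem.Dict.mk references) s [] = [] := by
  rcases pvGetD_cases references s with h0 | ⟨kv, hm, he, hv⟩
  · exact h0
  · exfalso
    apply h
    simp only [pvUniv, List.mem_toFinset, List.mem_flatMap]
    exact ⟨kv, hm, by rw [← he]; exact List.mem_cons_self ..⟩

lemma pvN_mono (references : List (String × List (String × String))) {v v' : List String}
    (h : ∀ x ∈ v, x ∈ v') : pvN references v' ≤ pvN references v := by
  apply Finset.card_le_card
  apply Finset.sdiff_subset_sdiff (Finset.Subset.refl _)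
  intro x hx
  simp only [List.mem_toFinset] at hx ⊢
  exact h x hx

lemma pvMem_add (v : List String) (s : String) : ∀ x ∈ v, x ∈ PySem.Set.add v s := by
  intro x hx
  simp only [PySem.Set.add]
  split <;> simp [hx]

lemma pvN_add_le (references : List (String × List (String × String))) (v : List String)
    (s : String) : pvN references (PySem.Set.add v s) ≤ pvN references v :=
  pvN_mono references (pvMem_add v s)

lemma pvN_add_lt (references : List (String × List (String × String))) {v : List String}
    {s : String} (hU : s ∈ pvUniv references) (hc : ¬ PySem.Set.contains v s = true) :
    pvN references (PySem.Set.add v s) < pvN references v := by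
  have hsv : s ∉ v := fun h => hc ((PySem.Set.contains_iff _ _).mpr h)
  have hadd : PySem.Set.add v s = v ++ [s] := by simp [PySem.Set.add, hsv]
  apply Finset.card_lt_card
  rw [hadd]
  refine ⟨Finset.sdiff_subset_sdiff (Finset.Subset.refl _) ?_, fun hsub => ?_⟩
  · intro x hx
    simp only [List.mem_toFinset] at hx ⊢
    simp [hx]
  · have h1 : s ∈ pvUniv references \ v.toFinset :=
      Finset.mem_sdiff.2 ⟨hU, by simp [hsv]⟩
    have h2 := hsub h1
    rw [Finset.mem_sdiff] at h2
    exact h2.2 (by simp)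

def pvGoB (references : List (String × List (String × String))) (node_classes : List (String × String))
    (stack : List String) (visited : List String) (wmc nattr : Int) : Int × Int :=
  match stack with
  | [] => (wmc, nattr)
  | node :: rest =>
    if PySem.Set.contains visited node then pvGoB references node_classes rest visited wmc nattr
    else
      let v' := PySem.Set.add visited node
      let st := (PySem.Dict.getD (PySem.Dict.mk references) node []).reverse.foldl
        (pvStep node_classes) (wmc, nattr, rest)
      pvGoB references node_classes st.2.2 v' st.1 st.2.1
termination_by pvK references * pvN references visited + stack.length
decreasing_by
  · simp only [List.length_cons]; omega
  · have hc : ¬ PySem.Set.contains visited node = true := by assumption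
    have hlen := pvFold_len node_classes
      ((PySem.Dict.getD (PySem.Dict.mk references) node []).reverse) (wmc, nattr, rest)
    rw [List.length_reverse] at hlen
    simp only [List.length_cons]
    by_cases hU : node ∈ pvUniv references
    · have h1 : pvN references (PySem.Set.add visited node) < pvN references visited :=
        pvN_add_lt references hU hc
      have hK : (PySem.Dict.getD (PySem.Dict.mk references) node []).length < pvK references := by
        have := pvGetD_len references node
        simp only [pvK]; omega
      have key : pvK references * pvN references (PySem.Set.add visited node) + pvK references
          ≤ pvK references * pvN references visited := by
        have := Nat.mul_le_mul_left (pvK references) (Nat.succ_le_of_lt h1)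
        simpa [Nat.mul_succ] using this
      simp only at hlen ⊢
      linarith
    · have hnil : PySem.Dict.getD (PySem.Dict.mk references) node [] = [] :=
        pvGetD_of_not_mem references node hU
      have h1 : pvN references (PySem.Set.add visited node) ≤ pvN references visited :=
        pvN_add_le references visited node
      have key := Nat.mul_le_mul_left (pvK references) h1
      rw [hnil] at hlen ⊢
      simp only [List.reverse_nil, List.foldl_nil] at hlen ⊢
      linarith

def count_wmc_nattr_py_alt (start_id : String) (references : List (String × List (String × String))) (node_classes : List (String × String)) (visited : Option (List String)) : Int × Int :=
  let v0 := match visited with | none => PySem.Set.empty | some v => v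
  pvGoB references node_classes [start_id] v0 0 0

-- ===== PRECONDITION & SPEC =====
def Spec_count_wmc_nattr_py (start_id : String) (references : List (String × List (String × String))) (node_classes : List (String × String)) (visited : Option (List String)) (out : Int × Int) : Prop := out = count_wmc_nattr_py_alt start_id references node_classes visited
instance (start_id : String) (references : List (String × List (String × String))) (node_classes : List (String × String)) (visited : Option (List String)) (out : Int × Int) : Decidable (Spec_count_wmc_nattr_py start_id references node_classes visited out) := by unfold Spec_count_wmc_nattr_py; infer_instance

-- ===== CLAIM (what is proved, stated in full; the proofs are below) =====
def Claim_equal_count_wmc_nattr_py : Prop := ∀ (start_id : String) (references : List (String × List (String × String))) (node_classes : List (String × String)) (visited : Option (List String)), Dom_count_wmc_nattr_py start_id references node_classes visited → Spec_count_wmc_nattr_py start_id references node_classes visited (count_wmc_nattr_py start_id references node_classes visited)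

-- ===== LEMMAS AND PROOFS =====

lemma pvGetD_targets_mem (references : List (String × List (String × String))) (s : String) :
    ∀ e ∈ PySem.Dict.getD (PySem.Dict.mk references) s [], e.2 ∈ pvUniv references := by
  rcases pvGetD_cases references s with h | ⟨kv, hm, _, hv⟩
  · simp [h]
  · intro e he
    rw [hv] at he
    simp only [pvUniv, List.mem_toFinset, List.mem_flatMap]
    exact ⟨kv, hm, List.mem_cons.2 (Or.inr (List.mem_map.2 ⟨e, he, rfl⟩))⟩

lemma pvN_pos (references : List (String × List (String × String))) {v : List String}
    {s : String} (hU : s ∈ pvUniv references) (hc : ¬ PySem.Set.contains v s = true) :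
    1 ≤ pvN references v := by
  have hsv : s ∉ v := fun h => hc ((PySem.Set.contains_iff _ _).mpr h)
  apply Finset.card_pos.mpr
  exact ⟨s, Finset.mem_sdiff.2 ⟨hU, by simp [hsv]⟩⟩

-- per-edge increments of a node's adjacency list, and its pushed component targets
def pvDw (node_classes : List (String × String)) : List (String × String) → Int
  | [] => 0
  | e :: rest =>
    (if e.1 == "HasComponent" || e.1 == "HasProperty" || e.1 == "HasAddIn" then
      (if PySem.Dict.getD (PySem.Dict.mk node_classes) e.2 "" == "UAMethod" then (1 : Int) else 0)
     else 0) + pvDw node_classes rest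

def pvDn (node_classes : List (String × String)) : List (String × String) → Int
  | [] => 0
  | e :: rest =>
    (if e.1 == "HasComponent" || e.1 == "HasProperty" || e.1 == "HasAddIn" then
      (if PySem.Dict.getD (PySem.Dict.mk node_classes) e.2 "" == "UAMethod" then (0 : Int)
       else if PySem.Dict.getD (PySem.Dict.mk node_classes) e.2 "" == "UAVariable" then 1 else 0)
     else 0) + pvDn node_classes rest

def pvT : List (String × String) → List String
  | [] => []
  | e :: rest =>
    if e.1 == "HasComponent" || e.1 == "HasProperty" || e.1 == "HasAddIn"
    then e.2 :: pvT rest else pvT rest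

-- sequential runs of A's recursion over a list of start nodes (proof-side reference chain)
def pvGoList (references : List (String × List (String × String))) (node_classes : List (String × String))
    (f : Nat) : List String → List String → Int × Int × List String
  | [], v => (0, 0, v)
  | t :: ts, v =>
    let a := pvGoA references node_classes f t v
    let b := pvGoList references node_classes f ts a.2.2
    (a.1 + b.1, a.2.1 + b.2.1, b.2.2)

lemma pvGoA_of_contains (refs : List (String × List (String × String))) (ncl : List (String × String))
    (f : Nat) (s : String) (v : List String) (h : PySem.Set.contains v s = true) :
    pvGoA refs ncl f s v = (0, 0, v) := by
  cases f with
  | zero => rw [pvGoA]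
  | succ g => rw [pvGoA, if_pos h]

lemma pvGrow (refs : List (String × List (String × String))) (ncl : List (String × String)) :
    ∀ f : Nat, (∀ s v x, x ∈ v → x ∈ (pvGoA refs ncl f s v).2.2) ∧
      (∀ es v x, x ∈ v → x ∈ (pvGoAEdges refs ncl f es v).2.2) := by
  intro f
  induction f with
  | zero =>
    have hA : ∀ s v x, x ∈ v → x ∈ (pvGoA refs ncl 0 s v).2.2 := by
      intro s v x hx; simpa [pvGoA] using hx
    refine ⟨hA, ?_⟩
    intro es
    induction es with
    | nil => intro v x hx; simpa [pvGoAEdges] using hx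
    | cons e rest ih =>
      obtain ⟨rt, t⟩ := e
      intro v x hx
      rw [pvGoAEdges]
      split
      · exact ih _ _ (hA _ _ _ hx)
      · exact ih _ _ hx
  | succ f ihf =>
    have hA : ∀ s v x, x ∈ v → x ∈ (pvGoA refs ncl (f + 1) s v).2.2 := by
      intro s v x hx
      rw [pvGoA]
      split
      · exact hx
      · exact ihf.2 _ _ _ (pvMem_add _ _ _ hx)
    refine ⟨hA, ?_⟩
    intro es
    induction es with
    | nil => intro v x hx; simpa [pvGoAEdges] using hx
    | cons e rest ih =>
      obtain ⟨rt, t⟩ := e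
      intro v x hx
      rw [pvGoAEdges]
      split
      · exact ih _ _ (hA _ _ _ hx)
      · exact ih _ _ hx

lemma pvGoList_sub (refs : List (String × List (String × String))) (ncl : List (String × String))
    (f : Nat) : ∀ ts v x, x ∈ v → x ∈ (pvGoList refs ncl f ts v).2.2 := by
  intro ts
  induction ts with
  | nil => intro v x hx; simpa [pvGoList] using hx
  | cons t ts ih =>
    intro v x hx
    simp only [pvGoList]
    exact ih _ _ ((pvGrow refs ncl f).1 _ _ _ hx)

lemma pvT_mem : ∀ (es : List (String × String)) (x : String), x ∈ pvT es → ∃ e ∈ es, e.2 = x := by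
  intro es
  induction es with
  | nil => intro x hx; simp [pvT] at hx
  | cons e rest ih =>
    intro x hx
    rw [pvT] at hx
    by_cases h : (e.1 == "HasComponent" || e.1 == "HasProperty" || e.1 == "HasAddIn") = true
    · rw [if_pos h] at hx
      rcases List.mem_cons.1 hx with h1 | h1
      · exact ⟨e, by simp, h1.symm⟩
      · obtain ⟨e', he', hx'⟩ := ih x h1
        exact ⟨e', by simp [he'], hx'⟩
    · rw [if_neg h] at hx
      obtain ⟨e', he', hx'⟩ := ih x hx
      exact ⟨e', by simp [he'], hx'⟩

lemma pvFoldChar (ncl : List (String × String)) :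
    ∀ (es : List (String × String)) (w n : Int) (st : List String),
      es.reverse.foldl (pvStep ncl) (w, n, st) =
        (w + pvDw ncl es, n + pvDn ncl es, pvT es ++ st) := by
  intro es
  induction es with
  | nil => intro w n st; simp [pvDw, pvDn, pvT]
  | cons e rest ih =>
    intro w n st
    rw [List.reverse_cons, List.foldl_append, ih]
    simp only [List.foldl_cons, List.foldl_nil]
    rw [pvStep, pvDw, pvDn, pvT]
    split_ifs <;> simp_all [Prod.ext_iff] <;> omega

lemma pvEdges_eq_list (refs : List (String × List (String × String))) (ncl : List (String × String))
    (f : Nat) : ∀ (es : List (String × String)) (v : List String),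
      pvGoAEdges refs ncl f es v =
        (pvDw ncl es + (pvGoList refs ncl f (pvT es) v).1,
         pvDn ncl es + (pvGoList refs ncl f (pvT es) v).2.1,
         (pvGoList refs ncl f (pvT es) v).2.2) := by
  intro es
  induction es with
  | nil => intro v; simp [pvGoAEdges, pvDw, pvDn, pvT, pvGoList]
  | cons e rest ih =>
    obtain ⟨rt, t⟩ := e
    intro v
    simp only [pvGoAEdges, pvDw, pvDn, pvT]
    split
    · rw [ih]
      simp only [pvGoList, Prod.mk.injEq]
      split_ifs <;> simp_all [Prod.ext_iff] <;> omega
    · rw [ih]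
      simp_all [Prod.ext_iff]

lemma pvN_le_len (refs : List (String × List (String × String))) (v : List String) :
    pvN refs v ≤ (refs.flatMap (fun kv => kv.1 :: kv.2.map Prod.snd)).length :=
  le_trans (Finset.card_le_card Finset.sdiff_subset) (List.toFinset_card_le _)

lemma pvBridge (refs : List (String × List (String × String))) (ncl : List (String × String)) :
    ∀ n : Nat, ∀ ts v rest (w nn : Int) (f : Nat),
      pvN refs v ≤ n → (∀ t ∈ ts, t ∈ pvUniv refs) → pvN refs v ≤ f →
      pvGoB refs ncl (ts ++ rest) v w nn =
        pvGoB refs ncl rest (pvGoList refs ncl f ts v).2.2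
          (w + (pvGoList refs ncl f ts v).1) (nn + (pvGoList refs ncl f ts v).2.1) := by
  intro n
  induction n using Nat.strong_induction_on with
  | _ n IH =>
    intro ts
    induction ts with
    | nil => intro v rest w nn f _ _ _; simp [pvGoList]
    | cons t ts' ihts =>
      intro v rest w nn f hn hU hf
      by_cases hc : PySem.Set.contains v t = true
      · rw [List.cons_append, pvGoB, if_pos hc]
        rw [ihts v rest w nn f hn (fun x hx => hU x (by simp [hx])) hf]
        simp [pvGoList, pvGoA_of_contains refs ncl f t v hc]
      · have hUt : t ∈ pvUniv refs := hU t (by simp)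
        have hN1 : 1 ≤ pvN refs v := pvN_pos refs hUt hc
        have hlt : pvN refs (PySem.Set.add v t) < pvN refs v := pvN_add_lt refs hUt hc
        obtain ⟨g, rfl⟩ : ∃ g, f = g + 1 := ⟨f - 1, by omega⟩
        rw [List.cons_append, pvGoB, if_neg hc, pvFoldChar]
        have hTmem : ∀ x ∈ pvT (PySem.Dict.getD (PySem.Dict.mk refs) t []), x ∈ pvUniv refs := by
          intro x hx
          obtain ⟨e, he, rfl⟩ := pvT_mem _ x hx
          exact pvGetD_targets_mem refs t e he
        have hm : pvN refs (PySem.Set.add v t) ≤ n - 1 := by omega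
        have hg : pvN refs (PySem.Set.add v t) ≤ g := by omega
        rw [IH (n - 1) (by omega) (pvT (PySem.Dict.getD (PySem.Dict.mk refs) t []))
          (PySem.Set.add v t) (ts' ++ rest) _ _ g hm hTmem hg]
        have hvL : ∀ x ∈ v,
            x ∈ (pvGoList refs ncl g (pvT (PySem.Dict.getD (PySem.Dict.mk refs) t []))
              (PySem.Set.add v t)).2.2 := by
          intro x hx
          exact pvGoList_sub refs ncl g _ _ x (pvMem_add v t x hx)
        have hNL : pvN refs (pvGoList refs ncl g (pvT (PySem.Dict.getD (PySem.Dict.mk refs) t []))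
            (PySem.Set.add v t)).2.2 ≤ pvN refs v := pvN_mono refs hvL
        rw [ihts _ rest _ _ (g + 1) (le_trans hNL hn)
          (fun x hx => hU x (by simp [hx])) (le_trans hNL hf)]
        have hA : pvGoA refs ncl (g + 1) t v =
            pvGoAEdges refs ncl g (PySem.Dict.getD (PySem.Dict.mk refs) t [])
              (PySem.Set.add v t) := by
          rw [pvGoA, if_neg hc]
        simp only [pvGoList, hA, pvEdges_eq_list refs ncl g]
        congr 1
        · omega
        · omega

lemma pvMain (refs : List (String × List (String × String))) (ncl : List (String × String))
    (s : String) (v0 : List String) :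
    ((pvGoA refs ncl (pvFuelA refs) s v0).1, (pvGoA refs ncl (pvFuelA refs) s v0).2.1) =
      pvGoB refs ncl [s] v0 0 0 := by
  by_cases hc : PySem.Set.contains v0 s = true
  · rw [pvGoA_of_contains refs ncl _ _ _ hc]
    have hc' : s ∈ v0 := (PySem.Set.contains_iff _ _).mp hc
    simp [pvGoB, hc']
  · by_cases hU : s ∈ pvUniv refs
    · have hfuel : pvN refs v0 ≤ pvFuelA refs := by
        have := pvN_le_len refs v0
        simp only [pvFuelA]; omega
      have hb := pvBridge refs ncl (pvN refs v0) [s] v0 [] 0 0 (pvFuelA refs)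
        le_rfl (by intro x hx; rw [List.mem_singleton] at hx; subst hx; exact hU) hfuel
      simp only [List.singleton_append] at hb
      rw [hb]
      simp [pvGoB, pvGoList]
    · have hnil := pvGetD_of_not_mem refs s hU
      obtain ⟨g, hg⟩ : ∃ g, pvFuelA refs = g + 1 := ⟨pvFuelA refs - 1, by simp [pvFuelA]⟩
      rw [hg, pvGoA, if_neg hc, hnil, pvGoAEdges]
      rw [pvGoB, if_neg hc, hnil]
      simp [pvGoB]

theorem count_wmc_nattr_py_spec : Claim_equal_count_wmc_nattr_py := by
  unfold Claim_equal_count_wmc_nattr_py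
  intro start_id refs ncl vis _
  unfold Spec_count_wmc_nattr_py
  cases vis with
  | none =>
    simp only [count_wmc_nattr_py, count_wmc_nattr_py_alt]
    exact pvMain refs ncl start_id PySem.Set.empty
  | some v =>
    simp only [count_wmc_nattr_py, count_wmc_nattr_py_alt]
    exact pvMain refs ncl start_id v
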